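-- pv_equiv track=rewrite | github.com/kaluginpeter/Algorithms_and_structures_tasks | Python_Solutions/CodeWars/6kyu/6_Matrices_How_Many_Matrices_Do_These_Elements_Produce.py | count_perms
-- ===== SOURCE A (Python) =====
-- from math import factorial, prod
--
-- def count_perms(matrix):
--     storage: dict[int, int] = dict()
--     for row in matrix:
--         for ceil in row:
--             storage[ceil] = storage.get(ceil, 0) + 1
--     total_repetive: int = factorial(len(matrix) * len(matrix[0]))
--     needed: int = prod(factorial(x) for x in storage.values())
--     return total_repetive // needed
-- ===== SOURCE B (Python) =====
-- from math import factorial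
--
-- def count_perms(matrix):
--     elems = sorted(v for row in matrix for v in row)
--     denom = 1
--     i = 0
--     n = len(elems)
--     while i < n:
--         j = i
--         while j < n and elems[j] == elems[i]:
--             j += 1
--         denom *= factorial(j - i)
--         i = j
--     return factorial(len(matrix) * len(matrix[0])) // denom
-- ===== Notes on version B (the rewrite author's own statement) =====
-- stated objective: alternative
-- what changed: B replaces A's dict-based frequency counter with a sort-then-scan: it flattens and sorts the elements and walks runs of equal values with two pointers, multiplying the factorial of each run length into the denominator; no dictionary is built.
import Mathlib
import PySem

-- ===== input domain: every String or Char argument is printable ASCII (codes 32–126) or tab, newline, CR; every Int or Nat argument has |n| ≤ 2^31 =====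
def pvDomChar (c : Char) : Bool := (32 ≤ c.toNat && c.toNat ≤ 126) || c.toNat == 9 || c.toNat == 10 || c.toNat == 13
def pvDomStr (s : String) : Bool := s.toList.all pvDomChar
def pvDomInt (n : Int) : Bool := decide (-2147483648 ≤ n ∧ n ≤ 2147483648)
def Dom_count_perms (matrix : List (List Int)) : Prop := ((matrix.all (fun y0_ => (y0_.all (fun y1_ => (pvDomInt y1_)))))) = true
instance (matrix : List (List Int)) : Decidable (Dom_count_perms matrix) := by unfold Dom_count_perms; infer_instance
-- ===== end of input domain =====

-- B replaces A's dict frequency counter with flatten + sort + a two-pointer run scan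
-- (factorial of each run length); an alternative of similar cost, not claimed faster.

-- math.factorial (argument is a nonnegative count here)
def pyFact (x : Int) : Int := (Nat.factorial x.toNat : Int)

-- ===== PORT A =====
def count_perms (matrix : List (List Int)) : Int :=
  let storage : PySem.Dict Int Int :=
    matrix.foldl (fun d row => row.foldl (fun d v => d.insert v (d.getD v 0 + 1)) d)
      PySem.Dict.empty
  let total_repetive : Int :=
    pyFact ((matrix.length : Int) * ((PySem.List.pyGetD matrix 0 []).length : Int))
  let needed : Int := (storage.values.map pyFact).prod
  PySem.Int.floordiv total_repetive needed

-- ===== PORT B =====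
-- the inner while loop of Source B: length of the run of values equal to the head
def groupDenom : List Int → Int
  | [] => 1
  | x :: t =>
    (Nat.factorial ((t.takeWhile (fun z => z == x)).length + 1) : Int) *
      groupDenom (t.dropWhile (fun z => z == x))
termination_by l => l.length
decreasing_by
  exact Nat.lt_succ_of_le (List.dropWhile_sublist _ (l := t)).length_le

def count_perms_alt (matrix : List (List Int)) : Int :=
  let elems : List Int := PySem.List.sorted (matrix.flatMap (fun row => row)) (fun v => v) false
  let denom : Int := groupDenom elems
  PySem.Int.floordiv
    (pyFact ((matrix.length : Int) * ((PySem.List.pyGetD matrix 0 []).length : Int))) denom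

-- ===== PRECONDITION & SPEC =====
-- Python A raises IndexError on the empty matrix (matrix[0]); excluded (B raises there too).
def Pre_count_perms (matrix : List (List Int)) : Prop := matrix ≠ []
instance (matrix : List (List Int)) : Decidable (Pre_count_perms matrix) := by
  unfold Pre_count_perms; infer_instance
def pvWitness_count_perms : List (List Int) := [[1, 2], [2, 3]]
def Spec_count_perms (matrix : List (List Int)) (out : Int) : Prop := out = count_perms_alt matrix
instance (matrix : List (List Int)) (out : Int) : Decidable (Spec_count_perms matrix out) := by
  unfold Spec_count_perms; infer_instance

-- ===== CLAIM (what is proved, stated in full; the proofs are below) =====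
def Claim_equal_count_perms : Prop := ∀ (matrix : List (List Int)), Dom_count_perms matrix → Pre_count_perms matrix → Spec_count_perms matrix (count_perms matrix)

-- ===== LEMMAS AND PROOFS =====

-- canonical form of the denominator: product over the distinct elements of factorials of counts
def factProd (l : List Int) : Int :=
  l.toFinset.prod (fun k => (Nat.factorial (l.count k) : Int))

theorem nested_foldl_eq_flat (matrix : List (List Int)) (d : PySem.Dict Int Int) :
    matrix.foldl (fun d row => row.foldl (fun d v => d.insert v (d.getD v 0 + 1)) d) d
      = (matrix.flatMap (fun row => row)).foldl (fun d v => d.insert v (d.getD v 0 + 1)) d := by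
  induction matrix generalizing d with
  | nil => rfl
  | cons r t ih => simp [List.foldl_append, ih]

theorem needed_eq_factProd (l : List Int) :
    (((l.foldl (fun d v => d.insert v (d.getD v 0 + 1)) PySem.Dict.empty).values.map pyFact).prod)
      = factProd l := by
  rw [PySem.Dict.foldl_insert_getD_add_one_eq_counter]
  rw [PySem.Dict.values_eq_map_keys _ (PySem.Dict.nodup_keys_counter l) 0]
  rw [List.map_map]
  have h1 : ((PySem.Dict.counter l).keys.map (pyFact ∘ fun k => (PySem.Dict.counter l).getD k 0))
      = (PySem.Dict.counter l).keys.map (fun k => (Nat.factorial (l.count k) : Int)) := by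
    apply List.map_congr_left
    intro k _
    simp [Function.comp, PySem.Dict.getD_counter, pyFact]
  rw [h1, PySem.Dict.keys_counter]
  have h2 : (PySem.Set.ofList l).toFinset = l.toFinset := by
    apply Finset.ext; intro a; simp [PySem.Set.mem_ofList]
  rw [factProd, ← h2, List.prod_toFinset _ (PySem.Set.nodup_ofList l)]

theorem head_not_mem_dropWhile (x : Int) (t : List Int)
    (hp : (x :: t).Pairwise (· ≤ ·)) : x ∉ t.dropWhile (fun z => z == x) := by
  intro hmem
  have hsub : (t.dropWhile (fun z => z == x)).Sublist t := List.dropWhile_sublist _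
  have hpt : t.Pairwise (· ≤ ·) := (List.pairwise_cons.mp hp).2
  have hpr : (t.dropWhile (fun z => z == x)).Pairwise (· ≤ ·) := hpt.sublist hsub
  cases hr : t.dropWhile (fun z => z == x) with
  | nil => simp [hr] at hmem
  | cons w r' =>
    have hne := List.head_dropWhile_not (fun z => z == x) (l := t) (by simp [hr])
    simp only [hr, List.head_cons] at hne
    have hwx : w ≠ x := by simpa using hne
    have hxw : x ≤ w := by
      have hwmem : w ∈ t := hsub.mem (by simp [hr])
      exact (List.pairwise_cons.mp hp).1 w hwmem
    rw [hr] at hmem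
    rcases List.mem_cons.mp hmem with h | h
    · exact hwx h.symm
    · have hwle : w ≤ x := (List.pairwise_cons.mp (hr ▸ hpr)).1 x h
      exact hwx (le_antisymm hwle hxw)

theorem takeWhile_all_eq (x : Int) (t : List Int) :
    ∀ z ∈ t.takeWhile (fun z => z == x), z = x := by
  intro z hz
  have := List.mem_takeWhile_imp hz
  simpa using this

theorem groupDenom_eq_factProd (l : List Int) (hp : l.Pairwise (· ≤ ·)) :
    groupDenom l = factProd l := by
  induction l using groupDenom.induct with
  | case1 => simp [groupDenom, factProd]
  | case2 x t ih =>
    have hpt : t.Pairwise (· ≤ ·) := (List.pairwise_cons.mp hp).2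
    have hpr : (t.dropWhile (fun z => z == x)).Pairwise (· ≤ ·) :=
      hpt.sublist (List.dropWhile_sublist _)
    rw [groupDenom, ih hpr]
    set c := t.takeWhile (fun z => z == x) with hc
    set r := t.dropWhile (fun z => z == x) with hr
    have htcr : t = c ++ r := (List.takeWhile_append_dropWhile).symm
    have hxr : x ∉ r := head_not_mem_dropWhile x t hp
    have hcx : ∀ z ∈ c, z = x := takeWhile_all_eq x t
    have hcc : c.count x = c.length := by
      rw [List.count_eq_length]
      intro z hz
      simp [hcx z hz]
    have hrc : r.count x = 0 := List.count_eq_zero.mpr hxr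
    have hcount_x : (x :: t).count x = c.length + 1 := by
      rw [htcr]
      simp only [List.count_cons, List.count_append, hcc, hrc]
      simp
    have hcount_ne : ∀ k, k ≠ x → (x :: t).count k = r.count k := by
      intro k hk
      have hc0 : c.count k = 0 := by
        rw [List.count_eq_zero]
        intro hkc
        exact hk (hcx k hkc)
      rw [htcr]
      simp only [List.count_cons, List.count_append, hc0]
      simp [Ne.symm hk]
    have hfin : (x :: t).toFinset = insert x r.toFinset := by
      apply Finset.ext; intro a
      simp only [List.toFinset_cons, Finset.mem_insert, List.mem_toFinset, htcr,
        List.mem_append]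
      constructor
      · rintro (h | h | h)
        · exact Or.inl h
        · exact Or.inl (hcx a h)
        · exact Or.inr h
      · rintro (h | h)
        · exact Or.inl h
        · exact Or.inr (Or.inr h)
    have hxnot : x ∉ r.toFinset := by simpa using hxr
    rw [← hcount_x]
    unfold factProd
    rw [hfin, Finset.prod_insert hxnot]
    congr 1
    apply Finset.prod_congr rfl
    intro k hk
    have hkne : k ≠ x := by
      intro h; subst h; exact hxnot hk
    rw [hcount_ne k hkne]

theorem denom_eq (xs : List Int) :
    ((((xs.foldl (fun d v => d.insert v (d.getD v 0 + 1)) PySem.Dict.empty).values.map pyFact).prod))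
      = groupDenom (PySem.List.sorted xs (fun v => v) false) := by
  rw [needed_eq_factProd]
  rw [groupDenom_eq_factProd _ (PySem.List.sorted_pairwise xs (fun v => v))]
  have hperm : (PySem.List.sorted xs (fun v => v) false).Perm xs :=
    PySem.List.sorted_perm xs (fun v => v) false
  unfold factProd
  have hfin : (PySem.List.sorted xs (fun v => v) false).toFinset = xs.toFinset := by
    apply Finset.ext; intro a
    simp [List.mem_toFinset, hperm.mem_iff]
  rw [hfin]
  apply Finset.prod_congr rfl
  intro k _
  rw [hperm.count_eq]

-- ===== VERDICT (by name: the statement is the Claim_ definition above) =====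
theorem count_perms_spec : Claim_equal_count_perms := by
  intro matrix _ _
  unfold Spec_count_perms count_perms count_perms_alt
  simp only []
  rw [nested_foldl_eq_flat, denom_eq]
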